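-- pv_equiv track=rewrite | github.com/JwahoonKim/PS | 백준/Python/17144.py | airClean
-- ===== SOURCE A (Python) =====
-- def airClean(arr):
--     row = len(arr)
--     col = len(arr[0])
--     # 공기청정기 위치 찾기, upper --> 공기청정기 위쪽 좌표
--     upper = 0
--     for i in range(row):
--         if arr[i][1] == -1:
--             upper = i
--             break
--     lower = upper + 1
--     direction = 0
--     # start point
--     x, y = upper - 1, 1
--     # 위쪽 공기청정기 작동
--     for i in range(upper - 1, 1, -1):
--         arr[i][1] = arr[i - 1][1]
--     for i in range(1, col - 1):
--         arr[1][i] = arr[1][i + 1]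
--     for i in range(1, upper):
--         arr[i][col - 2] = arr[i + 1][col - 2]
--     for i in range(col - 2, 1, -1):
--         arr[upper][i] = arr[upper][i - 1]
--     arr[upper][2] = 0
--
--     # 아래쪽 공기청정기 작동
--     for i in range(lower + 1, row - 1):
--         arr[i][1] = arr[i + 1][1]
--     for i in range(1, col - 1):
--         arr[row - 2][i] = arr[row - 2][i + 1]
--     for i in range(row - 1, lower, -1):
--         arr[i][col - 2] = arr[i - 1][col - 2]
--     for i in range(col - 2, 2, -1):
--         arr[lower][i] = arr[lower][i - 1]
--     arr[lower][2] = 0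
--     return arr
-- ===== SOURCE B (Python) =====
-- def airClean(arr):
--     row = len(arr)
--     col = len(arr[0])
--     upper = next((i for i in range(row) if arr[i][1] == -1), 0)
--     lower = upper + 1
--     # the circulation as data: the ordered (target, source) moves; source None means "becomes 0"
--     moves = []
--     moves += [((i, 1), (i - 1, 1)) for i in range(upper - 1, 1, -1)]
--     moves += [((1, j), (1, j + 1)) for j in range(1, col - 1)]
--     moves += [((i, col - 2), (i + 1, col - 2)) for i in range(1, upper)]
--     moves += [((upper, j), (upper, j - 1)) for j in range(col - 2, 1, -1)]
--     moves.append(((upper, 2), None))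
--     moves += [((i, 1), (i + 1, 1)) for i in range(lower + 1, row - 1)]
--     moves += [((row - 2, j), (row - 2, j + 1)) for j in range(1, col - 1)]
--     moves += [((i, col - 2), (i - 1, col - 2)) for i in range(row - 1, lower, -1)]
--     moves += [((lower, j), (lower, j - 1)) for j in range(col - 2, 2, -1)]
--     moves.append(((lower, 2), None))
--     ring = {tgt for tgt, _ in moves}
--     moves.reverse()
--
--     def value(cell):
--         if cell not in ring:
--             return arr[cell[0]][cell[1]]
--         # chase the cell's value backwards: the latest move that wrote the cell took its
--         # value from its source at that earlier time, and so on down to the start grid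
--         for tgt, src in moves:
--             if tgt == cell:
--                 if src is None:
--                     return 0
--                 cell = src
--         return arr[cell[0]][cell[1]]
--
--     return [[value((i, j)) for j in range(len(r))] for i, r in enumerate(arr)]
-- ===== Notes on version B (the rewrite author's own statement) =====
-- stated objective: alternative
-- what changed: A simulates the circulation forwards, mutating the grid in place through eight shift loops; B represents the circulation as a data object - the ordered list of (target, source) moves - and computes every output cell independently and without any mutation: cells outside the set of move targets are read straight from the input, and each ring cell's value is found by chasing it backwards through the reversed move list down to the original grid (demand-driven resolution instead of forward state simulation). …
import Mathlib
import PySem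

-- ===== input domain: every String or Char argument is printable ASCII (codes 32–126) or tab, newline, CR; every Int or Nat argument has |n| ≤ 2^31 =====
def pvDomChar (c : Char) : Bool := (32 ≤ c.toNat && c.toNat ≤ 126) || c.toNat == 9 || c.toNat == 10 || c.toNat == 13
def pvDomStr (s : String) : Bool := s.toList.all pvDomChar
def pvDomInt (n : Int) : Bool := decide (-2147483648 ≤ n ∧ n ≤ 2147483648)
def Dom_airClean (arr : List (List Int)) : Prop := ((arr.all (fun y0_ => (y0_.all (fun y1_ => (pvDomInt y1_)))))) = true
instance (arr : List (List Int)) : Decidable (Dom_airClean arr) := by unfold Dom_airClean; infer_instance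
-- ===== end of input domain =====

-- B represents the circulation as a list of (target, source) moves and computes every output cell
-- independently by chasing its value backwards through the reversed move list (demand-driven
-- resolution, no mutation), instead of A's forward in-place simulation; the equivalence proved here
-- is about the RETURN value only (Python A mutates its argument in place, Python B does not).

-- ===== PORT A =====
-- arr[i][j] read / arr[i][j] = v write; pyGetD/pySetD are Python-exact wherever Python returns
-- (Python's IndexError cases lie outside Pre_).

def pread (g : List (List Int)) (i j : Int) : Int :=
  PySem.List.pyGetD (PySem.List.pyGetD g i []) j 0

def pwrite (g : List (List Int)) (i j : Int) (v : Int) : List (List Int) :=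
  PySem.List.pySetD g i (PySem.List.pySetD (PySem.List.pyGetD g i []) j v)

def findNegLoop (arr : List (List Int)) : List Int → Int → Int
  | [], acc => acc
  | i :: rest, acc => if pread arr i 1 = -1 then i else findNegLoop arr rest acc

def airClean (arr : List (List Int)) : List (List Int) :=
  let row : Int := PySem.List.len arr
  let col : Int := PySem.List.len (PySem.List.pyGetD arr 0 ([] : List Int))
  let upper : Int := findNegLoop arr (PySem.List.pyRange 0 row 1) 0
  let lower : Int := upper + 1
  let g1 := (PySem.List.pyRange (upper - 1) 1 (-1)).foldl (fun g i => pwrite g i 1 (pread g (i - 1) 1)) arr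
  let g2 := (PySem.List.pyRange 1 (col - 1) 1).foldl (fun g i => pwrite g 1 i (pread g 1 (i + 1))) g1
  let g3 := (PySem.List.pyRange 1 upper 1).foldl (fun g i => pwrite g i (col - 2) (pread g (i + 1) (col - 2))) g2
  let g4 := (PySem.List.pyRange (col - 2) 1 (-1)).foldl (fun g i => pwrite g upper i (pread g upper (i - 1))) g3
  let g5 := pwrite g4 upper 2 0
  let g6 := (PySem.List.pyRange (lower + 1) (row - 1) 1).foldl (fun g i => pwrite g i 1 (pread g (i + 1) 1)) g5
  let g7 := (PySem.List.pyRange 1 (col - 1) 1).foldl (fun g i => pwrite g (row - 2) i (pread g (row - 2) (i + 1))) g6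
  let g8 := (PySem.List.pyRange (row - 1) lower (-1)).foldl (fun g i => pwrite g i (col - 2) (pread g (i - 1) (col - 2))) g7
  let g9 := (PySem.List.pyRange (col - 2) 2 (-1)).foldl (fun g i => pwrite g lower i (pread g lower (i - 1))) g8
  pwrite g9 lower 2 0

-- ===== PORT B =====
-- Source B's moves list: the circulation as data, in the order the assignments happen; none = "becomes 0".
def movesOf (row col upper lower : Int) : List ((Int × Int) × Option (Int × Int)) :=
  ((PySem.List.pyRange (upper - 1) 1 (-1)).map (fun i => ((i, (1 : Int)), some (i - 1, (1 : Int)))))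
  ++ ((PySem.List.pyRange 1 (col - 1) 1).map (fun j => (((1 : Int), j), some ((1 : Int), j + 1))))
  ++ ((PySem.List.pyRange 1 upper 1).map (fun i => ((i, col - 2), some (i + 1, col - 2))))
  ++ ((PySem.List.pyRange (col - 2) 1 (-1)).map (fun j => ((upper, j), some (upper, j - 1))))
  ++ [((upper, (2 : Int)), none)]
  ++ ((PySem.List.pyRange (lower + 1) (row - 1) 1).map (fun i => ((i, (1 : Int)), some (i + 1, (1 : Int)))))
  ++ ((PySem.List.pyRange 1 (col - 1) 1).map (fun j => ((row - 2, j), some (row - 2, j + 1))))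
  ++ ((PySem.List.pyRange (row - 1) lower (-1)).map (fun i => ((i, col - 2), some (i - 1, col - 2))))
  ++ ((PySem.List.pyRange (col - 2) 2 (-1)).map (fun j => ((lower, j), some (lower, j - 1))))
  ++ [((lower, (2 : Int)), none)]

-- Source B's value(cell): walk the reversed move list chasing the cell backwards to the start grid.
def chase (arr : List (List Int)) : List ((Int × Int) × Option (Int × Int)) → Int × Int → Int
  | [], c => pread arr c.1 c.2
  | m :: rest, c =>
    if m.1 = c then
      match m.2 with
      | none => 0
      | some s => chase arr rest s
    else chase arr rest c

def airClean_alt (arr : List (List Int)) : List (List Int) :=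
  let row : Int := PySem.List.len arr
  let col : Int := PySem.List.len (PySem.List.pyGetD arr 0 ([] : List Int))
  let upper : Int := ((PySem.List.pyRange 0 row 1).find? (fun i => pread arr i 1 == -1)).getD 0
  let lower : Int := upper + 1
  let moves := movesOf row col upper lower
  let ring := PySem.Set.ofList (moves.map (fun m => m.1))
  let rmoves := moves.reverse
  (PySem.List.enumerate arr 0).map (fun p =>
    (PySem.List.pyRange 0 (PySem.List.len p.2) 1).map (fun j =>
      if PySem.Set.contains ring (p.1, j) then chase arr rmoves (p.1, j)
      else pread arr p.1 j))

-- ===== PRECONDITION & SPEC =====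
-- Pre_ admits exactly the grids on which Python A completes without IndexError: at least 2 rows,
-- first row of length c ≥ 3, every row at least c long, and the first -1 in column 1 (if any) at
-- least two rows above the bottom; it conservatively excludes some ragged grids whose short rows A
-- happens never to touch (A and B still agree there, see the claim's cite).
def Pre_airClean (arr : List (List Int)) : Prop :=
  2 ≤ arr.length ∧
  3 ≤ (arr.headD []).length ∧
  (∀ r ∈ arr, (arr.headD []).length ≤ r.length) ∧
  (arr.findIdx (fun r => r.getD 1 0 == -1) + 2 ≤ arr.length ∨
    arr.findIdx (fun r => r.getD 1 0 == -1) = arr.length)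

instance (arr : List (List Int)) : Decidable (Pre_airClean arr) := by unfold Pre_airClean; infer_instance

def pvWitness_airClean : List (List Int) :=
  [[0, 0, 0], [0, -1, 0], [0, 0, 0], [0, 0, 0]]

def Spec_airClean (arr : List (List Int)) (out : List (List Int)) : Prop := out = airClean_alt arr
instance (arr : List (List Int)) (out : List (List Int)) : Decidable (Spec_airClean arr out) := by unfold Spec_airClean; infer_instance

-- ===== CLAIM (what is proved, stated in full; the proofs are below) =====
def Claim_equal_airClean : Prop := ∀ (arr : List (List Int)), Dom_airClean arr → Pre_airClean arr → Spec_airClean arr (airClean arr)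

-- ===== LEMMAS AND PROOFS =====

-- Forward execution of a move list: the semantics A's loops share (proof-only helper).
def execStep (g : List (List Int)) (m : (Int × Int) × Option (Int × Int)) : List (List Int) :=
  match m.2 with
  | none => pwrite g m.1.1 m.1.2 0
  | some s => pwrite g m.1.1 m.1.2 (pread g s.1 s.2)

def exec (g : List (List Int)) (ms : List ((Int × Int) × Option (Int × Int))) : List (List Int) :=
  ms.foldl execStep g

-- a move whose target is a canonical in-range cell of g and whose source (if any) is canonical
def GoodM (g : List (List Int)) (m : (Int × Int) × Option (Int × Int)) : Prop :=
  0 ≤ m.1.1 ∧ 0 ≤ m.1.2 ∧ m.1.1.toNat < g.length ∧ m.1.2.toNat < (g.getD m.1.1.toNat []).length ∧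
    (∀ s ∈ m.2, 0 ≤ s.1 ∧ 0 ≤ s.2)

lemma pread_nn (g : List (List Int)) (i j : Int) (hi : 0 ≤ i) (hj : 0 ≤ j) :
    pread g i j = (g.getD i.toNat []).getD j.toNat 0 := by
  unfold pread
  rw [PySem.List.pyGetD_of_nonneg _ _ hi, PySem.List.pyGetD_of_nonneg _ _ hj]

lemma pwrite_nn (g : List (List Int)) (i j : Int) (v : Int) (hi : 0 ≤ i) (hj : 0 ≤ j) :
    pwrite g i j v = g.set i.toNat ((g.getD i.toNat []).set j.toNat v) := by
  unfold pwrite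
  rw [PySem.List.pyGetD_of_nonneg _ _ hi, PySem.List.pySetD_of_nonneg _ _ hj,
    PySem.List.pySetD_of_nonneg _ _ hi]

lemma getD_set' {α : Type} (l : List α) (i k : Nat) (v : α) (d : α) :
    (l.set i v).getD k d = if k = i ∧ i < l.length then v else l.getD k d := by
  simp only [List.getD_eq_getElem?_getD, List.getElem?_set]
  by_cases h1 : i = k <;> by_cases h2 : i < l.length <;> simp [h1, h2]
  · simp [show k < l.length from h1 ▸ h2]
  · simp [show ¬ k < l.length from h1 ▸ h2]
  · intro h; omega

lemma pread_pwrite_ne (g : List (List Int)) (x y i j : Int) (v : Int) (hx : 0 ≤ x) (hy : 0 ≤ y)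
    (hi : 0 ≤ i) (hj : 0 ≤ j) (hne : x ≠ i ∨ y ≠ j) :
    pread (pwrite g x y v) i j = pread g i j := by
  rw [pwrite_nn g x y v hx hy, pread_nn _ i j hi hj, pread_nn g i j hi hj, getD_set']
  by_cases hxi : i.toNat = x.toNat ∧ x.toNat < g.length
  · have hxe : x = i := by omega
    have hyj : y ≠ j := hne.resolve_left (fun h => h hxe)
    rw [if_pos hxi, getD_set', if_neg (by omega), hxe]
  · rw [if_neg hxi]

lemma pread_pwrite_eq (g : List (List Int)) (x y : Int) (v : Int) (hx : 0 ≤ x) (hy : 0 ≤ y)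
    (hxr : x.toNat < g.length) (hyr : y.toNat < (g.getD x.toNat []).length) :
    pread (pwrite g x y v) x y = v := by
  rw [pwrite_nn g x y v hx hy, pread_nn _ x y hx hy, getD_set', if_pos ⟨rfl, hxr⟩,
    getD_set', if_pos ⟨rfl, hyr⟩]

lemma pwrite_shape (g : List (List Int)) (i j v : Int) (hi : 0 ≤ i) (hj : 0 ≤ j) :
    (pwrite g i j v).length = g.length ∧
      ∀ k, ((pwrite g i j v).getD k []).length = (g.getD k []).length := by
  rw [pwrite_nn g i j v hi hj]
  refine ⟨List.length_set, fun k => ?_⟩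
  rw [getD_set']
  split_ifs with h
  · rw [List.length_set, h.1]
  · rfl

lemma execStep_shape (g : List (List Int)) (m : (Int × Int) × Option (Int × Int))
    (hm : 0 ≤ m.1.1 ∧ 0 ≤ m.1.2) :
    (execStep g m).length = g.length ∧
      ∀ k, ((execStep g m).getD k []).length = (g.getD k []).length := by
  unfold execStep
  cases m.2 <;> exact pwrite_shape g m.1.1 m.1.2 _ hm.1 hm.2

lemma exec_shape (ms : List ((Int × Int) × Option (Int × Int))) (g : List (List Int))
    (h : ∀ m ∈ ms, 0 ≤ m.1.1 ∧ 0 ≤ m.1.2) :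
    (exec g ms).length = g.length ∧
      ∀ k, ((exec g ms).getD k []).length = (g.getD k []).length := by
  induction ms generalizing g with
  | nil => exact ⟨rfl, fun _ => rfl⟩
  | cons m t ih =>
    have hs := execStep_shape g m (h m (by simp))
    have ht := ih (execStep g m) (fun m' hm' => h m' (by simp [hm']))
    exact ⟨ht.1.trans hs.1, fun k => (ht.2 k).trans (hs.2 k)⟩

lemma exec_chase (g : List (List Int)) (ms : List ((Int × Int) × Option (Int × Int)))
    (hms : ∀ m ∈ ms, GoodM g m) (c : Int × Int) (hc1 : 0 ≤ c.1) (hc2 : 0 ≤ c.2) :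
    pread (exec g ms) c.1 c.2 = chase g ms.reverse c := by
  induction ms using List.reverseRecOn generalizing c with
  | nil => rfl
  | append_singleton t m ih =>
    have hGt : ∀ m' ∈ t, GoodM g m' := fun m' hm' => hms m' (by simp [hm'])
    have hGm : GoodM g m := hms m (by simp)
    have hshape := exec_shape t g (fun m' hm' => ⟨(hGt m' hm').1, (hGt m' hm').2.1⟩)
    have hexec : exec g (t ++ [m]) = execStep (exec g t) m := by
      unfold exec; rw [List.foldl_append]; rfl
    have hrev : (t ++ [m]).reverse = m :: t.reverse := by
      rw [List.reverse_append]; rfl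
    rw [hexec, hrev]
    show pread (execStep (exec g t) m) c.1 c.2 = chase g (m :: t.reverse) c
    by_cases hmc : m.1 = c
    · have hxr : m.1.1.toNat < (exec g t).length := by rw [hshape.1]; exact hGm.2.2.1
      have hyr : m.1.2.toNat < ((exec g t).getD m.1.1.toNat []).length := by
        rw [hshape.2]; exact hGm.2.2.2.1
      have hv : ∀ v, pread (execStep (exec g t) m) m.1.1 m.1.2 = v →
          pread (execStep (exec g t) m) c.1 c.2 = v := by
        intro v hvv; rw [← hmc]; exact hvv
      rw [chase, if_pos hmc]
      cases hsrc : m.2 with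
      | none =>
        refine hv 0 ?_
        unfold execStep; rw [hsrc]
        exact pread_pwrite_eq _ _ _ _ hGm.1 hGm.2.1 hxr hyr
      | some s =>
        have hs := hGm.2.2.2.2 s hsrc
        refine hv (chase g t.reverse s) ?_
        unfold execStep; rw [hsrc]
        rw [pread_pwrite_eq _ _ _ _ hGm.1 hGm.2.1 hxr hyr]
        exact ih hGt s hs.1 hs.2
    · have hne : m.1.1 ≠ c.1 ∨ m.1.2 ≠ c.2 := by
        by_cases h1 : m.1.1 = c.1
        · exact Or.inr (fun h2 => hmc (Prod.ext h1 h2))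
        · exact Or.inl h1
      rw [chase, if_neg hmc]
      have : pread (execStep (exec g t) m) c.1 c.2 = pread (exec g t) c.1 c.2 := by
        unfold execStep
        cases m.2 <;>
          exact pread_pwrite_ne _ _ _ _ _ _ hGm.1 hGm.2.1 hc1 hc2 hne
      rw [this]
      exact ih hGt c hc1 hc2

-- A's in-place loops are exactly forward execution of B's move list.
lemma airClean_eq_exec (arr : List (List Int)) :
    airClean arr = exec arr (movesOf (PySem.List.len arr)
      (PySem.List.len (PySem.List.pyGetD arr 0 ([] : List Int)))
      (findNegLoop arr (PySem.List.pyRange 0 (PySem.List.len arr) 1) 0)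
      (findNegLoop arr (PySem.List.pyRange 0 (PySem.List.len arr) 1) 0 + 1)) := by
  simp only [airClean, movesOf, exec, List.foldl_append, List.foldl_map, List.foldl_cons,
    List.foldl_nil, execStep]

-- A's purifier scan is B's find?-with-default.
lemma findNegLoop_eq_find? (arr : List (List Int)) (ks : List Int) (acc : Int) :
    findNegLoop arr ks acc = ((ks.find? (fun i => pread arr i 1 == -1)).getD acc) := by
  induction ks with
  | nil => rfl
  | cons b t ih =>
    rw [findNegLoop, List.find?]
    by_cases h : pread arr b 1 = -1
    · rw [if_pos h, show (pread arr b 1 == -1) = true from beq_iff_eq.mpr h]; rfl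
    · rw [if_neg h, show (pread arr b 1 == -1) = false from beq_eq_false_iff_ne.mpr h]
      exact ih

-- characterisation of the scan through findIdx on a dropped prefix
lemma findNegLoop_drop (arr : List (List Int)) :
    ∀ (n : Nat) (a : Nat), arr.length - a = n →
    findNegLoop arr (PySem.List.pyRange (a : Int) (arr.length : Int) 1) 0 =
      (if (arr.drop a).findIdx (fun r => r.getD 1 0 == -1) < (arr.drop a).length
       then ((a : Int) + ((arr.drop a).findIdx (fun r => r.getD 1 0 == -1) : Int)) else 0) := by
  intro n
  induction n with
  | zero =>
    intro a ha
    have hle : arr.length ≤ a := by omega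
    rw [PySem.List.pyRange_one_eq_nil (by exact_mod_cast hle), List.drop_eq_nil_of_le hle]
    simp [findNegLoop]
  | succ n ih =>
    intro a ha
    have hlt : a < arr.length := by omega
    rw [PySem.List.pyRange_one_cons (by exact_mod_cast hlt), findNegLoop]
    have hdrop : arr.drop a = arr[a] :: arr.drop (a + 1) := List.drop_eq_getElem_cons hlt
    have hpr : pread arr (a : Int) 1 = (arr[a] : List Int).getD 1 0 := by
      rw [pread_nn arr _ 1 (by positivity) (by norm_num)]
      congr 1
      · rw [Int.toNat_natCast, List.getD_eq_getElem?_getD, List.getElem?_eq_getElem hlt]; rfl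
    rw [hdrop]
    by_cases h : (arr[a] : List Int).getD 1 0 = -1
    · rw [if_pos (by rw [hpr]; exact h)]
      rw [List.findIdx_cons, show ((arr[a] : List Int).getD 1 0 == -1) = true from beq_iff_eq.mpr h,
        cond_true]
      simp
      omega
    · rw [if_neg (by rw [hpr]; exact h)]
      rw [List.findIdx_cons,
        show ((arr[a] : List Int).getD 1 0 == -1) = false from beq_eq_false_iff_ne.mpr h,
        cond_false, show ((a : Int) + 1) = ((a + 1 : Nat) : Int) by push_cast; ring,
        ih (a + 1) (by omega)]
      simp only [List.length_cons]
      split_ifs <;> push_cast <;> omega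

-- bounds on A's/B's upper under Pre_
lemma upper_bounds (arr : List (List Int)) (hpre : Pre_airClean arr) :
    0 ≤ findNegLoop arr (PySem.List.pyRange 0 (PySem.List.len arr) 1) 0 ∧
      findNegLoop arr (PySem.List.pyRange 0 (PySem.List.len arr) 1) 0 + 2 ≤ (arr.length : Int) := by
  obtain ⟨hr2, -, -, hidx⟩ := hpre
  have h0 := findNegLoop_drop arr arr.length 0 (by omega)
  simp only [Nat.cast_zero, List.drop_zero, zero_add] at h0
  rw [PySem.List.len_eq, h0]
  have hle := List.findIdx_le_length (p := fun r : List Int => r.getD 1 0 == -1) (xs := arr)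
  split_ifs with h <;> constructor <;> omega

lemma goodOf (arr : List (List Int)) (col : Int)
    (hcol : ∀ r ∈ arr, col ≤ (r.length : Int))
    (a b : Int) (ha : 0 ≤ a) (ha2 : a < (arr.length : Int)) (hb : 0 ≤ b) (hb2 : b < col)
    (s : Option (Int × Int)) (hs : ∀ x ∈ s, 0 ≤ x.1 ∧ 0 ≤ x.2) :
    GoodM arr ((a, b), s) := by
  have hlt : a.toNat < arr.length := by omega
  have hmem : arr.getD a.toNat [] ∈ arr := by
    rw [List.getD_eq_getElem?_getD, List.getElem?_eq_getElem hlt]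
    exact List.getElem_mem hlt
  have := hcol _ hmem
  exact ⟨ha, hb, hlt, by show b.toNat < (arr.getD a.toNat []).length; omega, hs⟩

set_option maxHeartbeats 1000000 in
lemma good_moves (arr : List (List Int)) (col U : Int)
    (hcol : ∀ r ∈ arr, col ≤ (r.length : Int)) (hc3 : 3 ≤ col)
    (hU0 : 0 ≤ U) (hU2 : U + 2 ≤ (arr.length : Int)) (hr2 : 2 ≤ (arr.length : Int)) :
    ∀ m ∈ movesOf (arr.length : Int) col U (U + 1), GoodM arr m := by
  intro m hm
  simp only [movesOf, List.mem_append, List.mem_map, List.mem_cons,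
    List.not_mem_nil, or_false] at hm
  have hsome : ∀ (p q : Int) (x : Int × Int), x ∈ some (p, q) → 0 ≤ p → 0 ≤ q → 0 ≤ x.1 ∧ 0 ≤ x.2 := by
    intro p q x hx hp hq
    simp only [Option.mem_def, Option.some_inj] at hx
    subst hx
    exact ⟨hp, hq⟩
  rcases hm with ((((((((h | h) | h) | h) | h) | h) | h) | h) | h) | h
  · obtain ⟨i, hi, rfl⟩ := h
    rw [PySem.List.mem_pyRange_neg_one] at hi
    exact goodOf arr col hcol i 1 (by omega) (by omega) (by omega) (by omega) _
      (fun x hx => hsome _ _ x hx (by omega) (by omega))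
  · obtain ⟨j, hj, rfl⟩ := h
    rw [PySem.List.mem_pyRange_one] at hj
    exact goodOf arr col hcol 1 j (by omega) (by omega) (by omega) (by omega) _
      (fun x hx => hsome _ _ x hx (by omega) (by omega))
  · obtain ⟨i, hi, rfl⟩ := h
    rw [PySem.List.mem_pyRange_one] at hi
    exact goodOf arr col hcol i (col - 2) (by omega) (by omega) (by omega) (by omega) _
      (fun x hx => hsome _ _ x hx (by omega) (by omega))
  · obtain ⟨j, hj, rfl⟩ := h
    rw [PySem.List.mem_pyRange_neg_one] at hj
    exact goodOf arr col hcol U j (by omega) (by omega) (by omega) (by omega) _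
      (fun x hx => hsome _ _ x hx (by omega) (by omega))
  · subst h
    exact goodOf arr col hcol U 2 (by omega) (by omega) (by omega) (by omega) _
      (fun x hx => by simp at hx)
  · obtain ⟨i, hi, rfl⟩ := h
    rw [PySem.List.mem_pyRange_one] at hi
    exact goodOf arr col hcol i 1 (by omega) (by omega) (by omega) (by omega) _
      (fun x hx => hsome _ _ x hx (by omega) (by omega))
  · obtain ⟨j, hj, rfl⟩ := h
    rw [PySem.List.mem_pyRange_one] at hj
    exact goodOf arr col hcol (arr.length - 2) j (by omega) (by omega) (by omega) (by omega) _
      (fun x hx => hsome _ _ x hx (by omega) (by omega))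
  · obtain ⟨i, hi, rfl⟩ := h
    rw [PySem.List.mem_pyRange_neg_one] at hi
    exact goodOf arr col hcol i (col - 2) (by omega) (by omega) (by omega) (by omega) _
      (fun x hx => hsome _ _ x hx (by omega) (by omega))
  · obtain ⟨j, hj, rfl⟩ := h
    rw [PySem.List.mem_pyRange_neg_one] at hj
    exact goodOf arr col hcol (U + 1) j (by omega) (by omega) (by omega) (by omega) _
      (fun x hx => hsome _ _ x hx (by omega) (by omega))
  · subst h
    exact goodOf arr col hcol (U + 1) 2 (by omega) (by omega) (by omega) (by omega) _
      (fun x hx => by simp at hx)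

-- a cell no move ever writes resolves directly to the start grid
lemma chase_not_target (arr : List (List Int)) (ms : List ((Int × Int) × Option (Int × Int)))
    (c : Int × Int) (h : ∀ m ∈ ms, m.1 ≠ c) : chase arr ms c = pread arr c.1 c.2 := by
  induction ms with
  | nil => rfl
  | cons m t ih =>
    rw [chase, if_neg (h m (by simp))]
    exact ih (fun m' hm' => h m' (by simp [hm']))

set_option maxHeartbeats 2000000 in
lemma main_eq (arr : List (List Int)) (hpre : Pre_airClean arr) :
    airClean arr = airClean_alt arr := by
  have hpre' := hpre
  obtain ⟨hr2, hc3, hrow, -⟩ := hpre'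
  simp only [airClean_alt]
  rw [← findNegLoop_eq_find?]
  set row : Int := PySem.List.len arr with hrowdef
  set col : Int := PySem.List.len (PySem.List.pyGetD arr 0 ([] : List Int)) with hcoldef
  set U : Int := findNegLoop arr (PySem.List.pyRange 0 row 1) 0 with hUdef
  have hrowl : row = (arr.length : Int) := by rw [hrowdef, PySem.List.len_eq]
  have hr2' : 2 ≤ (arr.length : Int) := by exact_mod_cast hr2
  have hcolh : col = ((arr.headD []).length : Int) := by
    rw [hcoldef, PySem.List.len_eq]
    congr 1
    rw [PySem.List.pyGetD_zero]
    cases arr <;> rfl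
  have hc3' : 3 ≤ col := by rw [hcolh]; exact_mod_cast hc3
  have hcol : ∀ r ∈ arr, col ≤ (r.length : Int) := by
    intro r hr
    rw [hcolh]
    exact_mod_cast hrow r hr
  obtain ⟨hU0, hU2⟩ := upper_bounds arr hpre
  rw [← hrowdef, ← hUdef] at hU0 hU2
  have hU2' : U + 2 ≤ (arr.length : Int) := hU2
  have hgood := good_moves arr col U hcol hc3' hU0 hU2' hr2'
  rw [← hrowl] at hgood
  rw [airClean_eq_exec arr, ← hrowdef, ← hcoldef, ← hUdef]
  set M := movesOf row col U (U + 1) with hM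
  clear_value M
  clear_value U
  clear hUdef hU0 hU2 hM
  clear_value row col
  have hshape := exec_shape M arr (fun m hm => ⟨(hgood m hm).1, (hgood m hm).2.1⟩)
  refine List.ext_getElem ?_ ?_
  · rw [hshape.1, List.length_map, PySem.List.length_enumerate]
  · intro k hk1 hk2
    have hkarr : k < arr.length := by rw [hshape.1] at hk1; exact hk1
    rw [List.getElem_map, PySem.List.getElem_enumerate]
    simp only [zero_add]
    have hrowk : ((exec arr M).getD k []).length = arr[k].length := by
      rw [hshape.2 k, List.getD_eq_getElem?_getD, List.getElem?_eq_getElem hkarr]; rfl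
    have hgetk : (exec arr M)[k] = (exec arr M).getD k [] := by
      rw [List.getD_eq_getElem?_getD, List.getElem?_eq_getElem hk1]; rfl
    refine List.ext_getElem ?_ ?_
    · rw [List.length_map, PySem.List.length_pyRange_one, hgetk, hrowk, PySem.List.len_eq]
      omega
    · intro j hj1 hj2
      rw [List.getElem_map, PySem.List.getElem_pyRange_one]
      have hjr : j < arr[k].length := by rw [hgetk, hrowk] at hj1; exact hj1
      have hch := exec_chase arr M hgood ((k : Int), (j : Int))
        (Int.natCast_nonneg k) (Int.natCast_nonneg j)
      rw [pread_nn _ _ _ (Int.natCast_nonneg k) (Int.natCast_nonneg j)] at hch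
      simp only [Int.toNat_natCast] at hch
      rw [show ((exec arr M).getD k []).getD j 0 = ((exec arr M).getD k [])[j] from by
        rw [List.getD_eq_getElem?_getD, List.getElem?_eq_getElem (by rw [hrowk]; exact hjr)]; rfl] at hch
      have hg : (exec arr M).getD k [] = (exec arr M)[k] := by
        rw [List.getD_eq_getElem?_getD, List.getElem?_eq_getElem hk1]; rfl
      simp only [hg] at hch
      rw [show (0 : Int) + (j : Int) = (j : Int) from by omega]
      by_cases hmem : ((k : Int), (j : Int)) ∈ M.map (fun m => m.1)
      · rw [if_pos ((PySem.Set.contains_iff _ _).mpr ((PySem.Set.mem_ofList _ _).mpr hmem))]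
        exact hch
      · rw [if_neg (by
          intro hcon
          exact hmem ((PySem.Set.mem_ofList _ _).mp ((PySem.Set.contains_iff _ _).mp hcon)))]
        rw [chase_not_target arr M.reverse _ (by
          intro m hm
          rw [List.mem_reverse] at hm
          exact fun hq => hmem (List.mem_map.mpr ⟨m, hm, hq⟩))] at hch
        rw [pread_nn _ _ _ (Int.natCast_nonneg k) (Int.natCast_nonneg j)] at hch
        rw [pread_nn _ _ _ (Int.natCast_nonneg k) (Int.natCast_nonneg j)]
        exact hch

-- ===== VERDICT (by name: the statement is the Claim_ definition above) =====
theorem airClean_spec : Claim_equal_airClean := by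
  intro arr _hdom hpre
  unfold Spec_airClean
  exact main_eq arr hpre
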